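-- pv_equiv track=rewrite | github.com/colombus-dev/metamodel4manifest | DSL4Pipelines/src/tools/transformations/toMermaid.py | sanitize_code_for_mermaid
-- ===== SOURCE A (Python) =====
-- def sanitize_code_for_mermaid(text):
--     if not text:
--         return ""
--     # converts the input to string if it's not already a string, to avoid errors when calling replace on non-string types
--     t = str(text)
--
--     replacements = {
--         "{": "&#123;",  # Accolade ouvrante
--         "}": "&#125;",  # Accolade fermante
--         "(": "&#40;",  # Parenthèse ouvrante
--         ")": "&#41;",  # Parenthèse fermante
--         '"': "&quot;",  # Guillemet double
--         "'": "&#39;",  # Guillemet simple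
--         "\n": "\\n",  # On remplace les sauts de ligne par des \n pour que ça s'affiche correctement dans Mermaid
--     }
--
--     for char, replacement in replacements.items():
--         t = t.replace(char, replacement)
--
--     return t
-- ===== SOURCE B (Python) =====
-- # B: one character-by-character pass with a lookup table instead of seven sequential full-string replace passes.
-- def sanitize_code_for_mermaid(text):
--     if not text:
--         return ""
--     t = str(text)
--     replacements = {
--         "{": "&#123;",
--         "}": "&#125;",
--         "(": "&#40;",
--         ")": "&#41;",
--         '"': "&quot;",
--         "'": "&#39;",
--         "\n": "\\n",
--     }
--     return "".join(replacements.get(c, c) for c in t)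
-- ===== Notes on version B (the rewrite author's own statement) =====
-- stated objective: alternative
-- what changed: Instead of looping over the seven replacement pairs and rescanning the whole string with replace each time, B makes a single character-by-character pass over the text and joins each character's table lookup (safe because no replacement output contains a replacement key).
import Mathlib
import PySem

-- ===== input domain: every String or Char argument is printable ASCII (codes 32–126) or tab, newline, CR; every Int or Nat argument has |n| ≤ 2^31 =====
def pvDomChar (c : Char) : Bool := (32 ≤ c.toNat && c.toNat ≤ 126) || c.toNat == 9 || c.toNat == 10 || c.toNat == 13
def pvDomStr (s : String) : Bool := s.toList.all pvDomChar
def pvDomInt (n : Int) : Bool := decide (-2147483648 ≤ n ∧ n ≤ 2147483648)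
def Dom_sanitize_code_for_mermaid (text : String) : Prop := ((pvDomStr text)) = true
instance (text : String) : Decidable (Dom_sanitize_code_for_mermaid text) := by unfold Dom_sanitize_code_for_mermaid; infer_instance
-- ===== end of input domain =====

-- B replaces A's seven sequential full-string replace passes by ONE character-by-character
-- pass with a lookup table (no replacement output contains a replacement key, so this is exact).


-- ===== PORT A =====
def sanitize_code_for_mermaid (text : String) : String :=
  if text = "" then "" else
    let t := text
    let t := PySem.Str.replace t "{" "&#123;"
    let t := PySem.Str.replace t "}" "&#125;"
    let t := PySem.Str.replace t "(" "&#40;"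
    let t := PySem.Str.replace t ")" "&#41;"
    let t := PySem.Str.replace t "\"" "&quot;"
    let t := PySem.Str.replace t "'" "&#39;"
    let t := PySem.Str.replace t "\n" "\\n"
    t

-- ===== PORT B =====
-- the replacements dict of Source B (keys are the 1-character strings, held as Char)
def pvRepl : PySem.Dict Char String :=
  PySem.Dict.mk [('{', "&#123;"), ('}', "&#125;"), ('(', "&#40;"), (')', "&#41;"),
                 ('"', "&quot;"), ('\'', "&#39;"), ('\n', "\\n")]

def sanitize_code_for_mermaid_alt (text : String) : String :=
  if text = "" then "" else
    PySem.Str.join "" (text.toList.map (fun c => pvRepl.getD c (String.ofList [c])))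

-- ===== PRECONDITION & SPEC =====
def Spec_sanitize_code_for_mermaid (text : String) (out : String) : Prop := out = sanitize_code_for_mermaid_alt text
instance (text : String) (out : String) : Decidable (Spec_sanitize_code_for_mermaid text out) := by unfold Spec_sanitize_code_for_mermaid; infer_instance

-- ===== CLAIM (what is proved, stated in full; the proofs are below) =====
def Claim_equal_sanitize_code_for_mermaid : Prop := ∀ (text : String), Dom_sanitize_code_for_mermaid text → Spec_sanitize_code_for_mermaid text (sanitize_code_for_mermaid text)

-- ===== LEMMAS AND PROOFS =====
-- replacing a single-character pattern is a per-character flatMap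
def repC (key : Char) (new : List Char) (l : List Char) : List Char :=
  l.flatMap (fun x => if x = key then new else [x])

theorem go_single (c : Char) (new : List Char) :
    ∀ (fuel : Nat) (l acc : List Char), l.length ≤ fuel →
      PySem.Chars.replace.go [c] new fuel l acc = acc.reverse ++ repC c new l := by
  intro fuel
  induction fuel with
  | zero => intro l acc h; cases l with
    | nil => simp [PySem.Chars.replace.go, repC]
    | cons a t => simp at h
  | succ n ih =>
    intro l acc h
    cases l with
    | nil => simp [PySem.Chars.replace.go, repC]
    | cons a t =>
      simp only [PySem.Chars.replace.go]
      by_cases hc : a = c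
      · subst hc
        simp [List.isPrefixOf, ih t _ (by simpa using h), repC]
      · simp [List.isPrefixOf, hc, ih t _ (by simpa using h), repC]
        intro h'; exact absurd h'.symm hc

theorem replace_single (s : List Char) (c : Char) (new : List Char) :
    PySem.Chars.replace s [c] new = repC c new s := by
  simp [PySem.Chars.replace, go_single c new s.length s [] le_rfl]

-- A's seven-pass pipeline, on character lists
def chain (l : List Char) : List Char :=
  repC '\n' "\\n".toList (repC '\'' "&#39;".toList (repC '"' "&quot;".toList
    (repC ')' "&#41;".toList (repC '(' "&#40;".toList
      (repC '}' "&#125;".toList (repC '{' "&#123;".toList l))))))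

theorem chain_append (a b : List Char) : chain (a ++ b) = chain a ++ chain b := by
  simp [chain, repC]

-- on one character the pipeline computes exactly B's table lookup
theorem chain_single (x : Char) :
    chain [x] = (pvRepl.getD x (String.ofList [x])).toList := by
  by_cases h1 : x = '{'; · subst h1; decide
  by_cases h2 : x = '}'; · subst h2; decide
  by_cases h3 : x = '('; · subst h3; decide
  by_cases h4 : x = ')'; · subst h4; decide
  by_cases h5 : x = '"'; · subst h5; decide
  by_cases h6 : x = '\''; · subst h6; decide
  by_cases h7 : x = '\n'; · subst h7; decide
  simp [chain, repC, h1, h2, h3, h4, h5, h6, h7, pvRepl, PySem.Dict.getD, Ne.symm h1,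
    Ne.symm h2, Ne.symm h3, Ne.symm h4, Ne.symm h5, Ne.symm h6, Ne.symm h7, PySem.Dict.get?]

theorem chain_eq_flat (l : List Char) :
    chain l = (l.map (fun c => (pvRepl.getD c (String.ofList [c])).toList)).flatten := by
  induction l with
  | nil => decide
  | cons a t ih =>
    rw [show (a :: t) = [a] ++ t from rfl, chain_append, chain_single, ih]
    simp

theorem flatten_intersperse_nil (ls : List (List Char)) :
    (List.intersperse ([] : List Char) ls).flatten = ls.flatten := by
  induction ls with
  | nil => rfl
  | cons a t ih =>
    cases t with
    | nil => simp
    | cons b u =>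
      have : List.intersperse ([] : List Char) (a :: b :: u)
          = a :: [] :: List.intersperse [] (b :: u) := rfl
      rw [this]; simp at ih ⊢; simpa using ih

theorem join_empty (parts : List String) :
    PySem.Str.join "" parts = String.ofList (parts.map String.toList).flatten := by
  simp [PySem.Str.join, PySem.Chars.join, List.intercalate, flatten_intersperse_nil]

theorem ab_eq : ∀ text, sanitize_code_for_mermaid text = sanitize_code_for_mermaid_alt text := by
  intro text
  unfold sanitize_code_for_mermaid sanitize_code_for_mermaid_alt
  by_cases h : text = ""
  · simp [h]
  · simp only [h, if_false]
    rw [join_empty]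
    have hA : PySem.Str.replace (PySem.Str.replace (PySem.Str.replace (PySem.Str.replace
        (PySem.Str.replace (PySem.Str.replace (PySem.Str.replace text "{" "&#123;")
        "}" "&#125;") "(" "&#40;") ")" "&#41;") "\"" "&quot;") "'" "&#39;") "\n" "\\n"
        = String.ofList (chain text.toList) := by
      simp [PySem.Str.replace, replace_single, chain]
    rw [hA, chain_eq_flat]
    rw [List.map_map]
    refine congrArg String.ofList (congrArg List.flatten (List.map_congr_left ?_))
    intro c _
    rfl

-- ===== VERDICT (by name: the statement is the Claim_ definition above) =====
theorem sanitize_code_for_mermaid_spec : Claim_equal_sanitize_code_for_mermaid := by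
  intro text _
  unfold Spec_sanitize_code_for_mermaid
  exact ab_eq text
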